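-- pv_equiv track=rewrite | github.com/skyesoverlondon-alt/skyesol | _fix_nav.py | find_mega_nav_bounds
-- ===== SOURCE A (Python) =====
-- def find_mega_nav_bounds(content):
--     marker = 'id="megaNav"'
--     idx = content.find(marker)
--     if idx == -1:
--         return -1, -1
--     # walk back to find opening <div
--     start = content.rfind('<div', 0, idx + len(marker))
--     if start == -1:
--         return -1, -1
--     depth = 0
--     i = start
--     while i < len(content):
--         if content[i:i+4] == '<div':
--             depth += 1
--             i += 4
--         elif content[i:i+6] == '</div>':
--             depth -= 1
--             i += 6
--             if depth == 0:
--                 return start, i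
--         else:
--             i += 1
--     return start, -1
-- ===== SOURCE B (Python) =====
-- def _div_tokens(content, start):
--     """Tokenize content[start:] into an ordered list of (+1, end) for '<div'
--     and (-1, end) for '</div>', using str.find to jump between tokens."""
--     toks = []
--     i = start
--     while True:
--         o = content.find('<div', i)
--         c = content.find('</div>', i)
--         if o == -1 and c == -1:
--             return toks
--         if c == -1 or (o != -1 and o < c):
--             toks.append((1, o + 4))
--             i = o + 4
--         else:
--             toks.append((-1, c + 6))
--             i = c + 6
--
--
-- def find_mega_nav_bounds(content):
--     marker = 'id="megaNav"'
--     idx = content.find(marker)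
--     if idx == -1:
--         return -1, -1
--     start = content.rfind('<div', 0, idx + len(marker))
--     if start == -1:
--         return -1, -1
--     depth = 0
--     for d, end in _div_tokens(content, start):
--         depth += d
--         if d == -1 and depth == 0:
--             return start, end
--     return start, -1
-- ===== Notes on version B (the rewrite author's own statement) =====
-- stated objective: alternative
-- what changed: A's character-by-character scan with a depth counter is replaced by a tokenize-then-fold decomposition: first build the ordered list of opening/closing div-tag tokens by jumping between occurrences with str.find, then fold a depth counter over that token list.
import Mathlib
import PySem

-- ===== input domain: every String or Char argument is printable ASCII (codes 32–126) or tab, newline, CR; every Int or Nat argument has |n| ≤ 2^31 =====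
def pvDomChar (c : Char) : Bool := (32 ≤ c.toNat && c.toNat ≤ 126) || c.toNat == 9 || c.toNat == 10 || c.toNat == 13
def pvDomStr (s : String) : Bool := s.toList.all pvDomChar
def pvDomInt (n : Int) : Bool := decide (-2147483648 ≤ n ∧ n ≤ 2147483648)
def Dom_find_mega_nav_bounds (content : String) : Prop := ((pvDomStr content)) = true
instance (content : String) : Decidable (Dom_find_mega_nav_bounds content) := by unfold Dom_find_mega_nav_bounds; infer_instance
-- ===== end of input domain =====

-- B replaces A's character-by-character scan by a tokenize-then-fold decomposition
-- (build the ordered '<div'/'</div>' token list with str.find jumps, then fold a depth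
-- counter over it); objective: alternative decomposition, same asymptotic cost.

-- ===== PORT A =====
def pvOpenTok : List Char := ['<', 'd', 'i', 'v']
def pvCloseTok : List Char := ['<', '/', 'd', 'i', 'v', '>']

-- A's while-loop; i is the (nonnegative) scan position.  Python's slice
-- content[i:i+4] on a nonnegative index is exactly (cs.drop i).take 4
-- (PySem.List.slice_natCast_add).  The fuel parameter only makes termination
-- evident (each step advances i by at least 1, and the loop stops at i ≥ len);
-- any fuel with cs.length ≤ fuel + i computes the loop's value (loopA_fuel below).
def loopA (cs : List Char) (start : Int) : Nat → Nat → Int → Int × Int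
  | 0, _, _ => (start, -1)
  | fuel + 1, i, depth =>
    if i < cs.length then
      if (cs.drop i).take 4 = pvOpenTok then
        loopA cs start fuel (i + 4) (depth + 1)
      else if (cs.drop i).take 6 = pvCloseTok then
        if depth - 1 = 0 then (start, ((i + 6 : Nat) : Int))
        else loopA cs start fuel (i + 6) (depth - 1)
      else
        loopA cs start fuel (i + 1) depth
    else (start, -1)

def find_mega_nav_bounds (content : String) : Int × Int :=
  let marker := "id=\"megaNav\"".toList
  let cs := content.toList
  let idx := PySem.Chars.find cs marker
  if idx = -1 then (-1, -1)
  else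
    let start := PySem.Chars.rfindFrom cs pvOpenTok 0 (some (idx + (marker.length : Int)))
    if start = -1 then (-1, -1)
    else loopA cs start cs.length start.toNat 0

-- ===== PORT B =====
-- the ordered token list of Source B's _div_tokens: (+1, end) for '<div', (-1, end) for
-- '</div>'.  Fuel again only makes termination evident (a found token lies at or
-- after i and advances i by at least 4; past the end both finds return -1, which is
-- the i ≤ cs.length guard); any fuel with cs.length + 1 ≤ fuel + i computes the list.
def tokensB (cs : List Char) : Nat → Nat → List (Int × Nat)
  | 0, _ => []
  | fuel + 1, i =>
    if i ≤ cs.length then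
      let o := PySem.Chars.findFrom cs pvOpenTok (i : Int)
      let c := PySem.Chars.findFrom cs pvCloseTok (i : Int)
      if o = -1 ∧ c = -1 then []
      else if c = -1 ∨ (o ≠ -1 ∧ o < c) then
        (1, o.toNat + 4) :: tokensB cs fuel (o.toNat + 4)
      else
        (-1, c.toNat + 6) :: tokensB cs fuel (c.toNat + 6)
    else []

-- Source B's depth fold over the token list
def foldB (start : Int) (toks : List (Int × Nat)) (depth : Int) : Int × Int :=
  match toks with
  | [] => (start, -1)
  | (d, e) :: rest =>
      if d = -1 ∧ depth + d = 0 then (start, (e : Int))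
      else foldB start rest (depth + d)

def find_mega_nav_bounds_alt (content : String) : Int × Int :=
  let marker := "id=\"megaNav\"".toList
  let cs := content.toList
  let idx := PySem.Chars.find cs marker
  if idx = -1 then (-1, -1)
  else
    let start := PySem.Chars.rfindFrom cs pvOpenTok 0 (some (idx + (marker.length : Int)))
    if start = -1 then (-1, -1)
    else foldB start (tokensB cs (cs.length + 1) start.toNat) 0

-- ===== PRECONDITION & SPEC =====
def Spec_find_mega_nav_bounds (content : String) (out : Int × Int) : Prop := out = find_mega_nav_bounds_alt content
instance (content : String) (out : Int × Int) : Decidable (Spec_find_mega_nav_bounds content out) := by unfold Spec_find_mega_nav_bounds; infer_instance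

-- ===== CLAIM (what is proved, stated in full; the proofs are below) =====
def Claim_equal_find_mega_nav_bounds : Prop := ∀ (content : String), Dom_find_mega_nav_bounds content → Spec_find_mega_nav_bounds content (find_mega_nav_bounds content)

-- ===== LEMMAS AND PROOFS =====

-- a found occurrence lies at or after the start index, and is a prefix there
theorem pvFindFrom_ge (cs sub : List Char) (i : Nat) (hi : i ≤ cs.length)
    (h : PySem.Chars.findFrom cs sub (i : Int) ≠ -1) :
    i ≤ (PySem.Chars.findFrom cs sub (i : Int)).toNat ∧
      sub <+: cs.drop (PySem.Chars.findFrom cs sub (i : Int)).toNat := by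
  have hs := PySem.Chars.findFrom_natCast_spec cs sub i hi h
  exact ⟨by omega, hs.2.1⟩

-- a 4- resp. 6-character slice equals the token iff the token is a prefix there
theorem matchO_iff (cs : List Char) (i : Nat) :
    (cs.drop i).take 4 = pvOpenTok ↔ pvOpenTok <+: cs.drop i := by
  have hl : pvOpenTok.length = 4 := rfl
  rw [List.prefix_iff_eq_take, hl, eq_comm]

theorem matchC_iff (cs : List Char) (i : Nat) :
    (cs.drop i).take 6 = pvCloseTok ↔ pvCloseTok <+: cs.drop i := by
  have hl : pvCloseTok.length = 6 := rfl
  rw [List.prefix_iff_eq_take, hl, eq_comm]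

-- a '</div>' match excludes a '<div' match at the same position
theorem not_matchO_of_matchC (cs : List Char) (i : Nat)
    (h : (cs.drop i).take 6 = pvCloseTok) : ¬ (cs.drop i).take 4 = pvOpenTok := by
  have h4 : (cs.drop i).take 4 = List.take 4 ((cs.drop i).take 6) := by
    rw [List.take_take]; norm_num
  rw [h4, h]
  decide

theorem infix_drop_mono (cs sub : List Char) (i j : Nat) (hij : i ≤ j)
    (h : sub <:+: cs.drop j) : sub <:+: cs.drop i := by
  have hd : cs.drop j = (cs.drop i).drop (j - i) := by
    rw [List.drop_drop]; congr 1; omega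
  rw [hd] at h
  exact h.trans (List.drop_suffix _ _).isInfix

theorem no_prefix_of_no_infix (cs sub : List Char) (i j : Nat) (hij : i ≤ j)
    (h : ¬ sub <:+: cs.drop i) : ¬ sub <+: cs.drop j :=
  fun hp => h (infix_drop_mono cs sub i j hij hp.isInfix)

-- the loop's value once the position has passed the end
theorem loopA_ge (cs : List Char) (start : Int) (i : Nat) (depth : Int)
    (h : cs.length ≤ i) : ∀ f, loopA cs start f i depth = (start, -1) := by
  intro f
  cases f with
  | zero => rfl
  | succ f => rw [loopA, if_neg (by omega)]

-- any sufficient fuel computes the same loop value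
theorem loopA_fuel (cs : List Char) (start : Int) :
    ∀ (f g i : Nat) (depth : Int), cs.length ≤ f + i → cs.length ≤ g + i →
      loopA cs start f i depth = loopA cs start g i depth := by
  intro f
  induction f with
  | zero =>
      intro g i depth hf hg
      rw [loopA_ge cs start i depth (by omega), loopA_ge cs start i depth (by omega)]
  | succ f ih =>
      intro g i depth hf hg
      by_cases hi : i < cs.length
      · obtain ⟨g', rfl⟩ : ∃ g', g = g' + 1 := ⟨g - 1, by omega⟩
        rw [loopA, loopA, if_pos hi, if_pos hi]
        by_cases h4 : (cs.drop i).take 4 = pvOpenTok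
        · rw [if_pos h4, if_pos h4]
          exact ih g' (i + 4) (depth + 1) (by omega) (by omega)
        · rw [if_neg h4, if_neg h4]
          by_cases h6 : (cs.drop i).take 6 = pvCloseTok
          · rw [if_pos h6, if_pos h6]
            by_cases hd : depth - 1 = 0
            · rw [if_pos hd, if_pos hd]
            · rw [if_neg hd, if_neg hd]
              exact ih g' (i + 6) (depth - 1) (by omega) (by omega)
          · rw [if_neg h6, if_neg h6]
            exact ih g' (i + 1) depth (by omega) (by omega)
      · rw [loopA_ge cs start i depth (by omega), loopA_ge cs start i depth (by omega)]

-- A's loop walks unchanged over a stretch with no token occurrence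
theorem loopA_skip (cs : List Char) (start : Int) (p : Nat) (hpl : p ≤ cs.length) :
    ∀ (f i : Nat) (depth : Int), cs.length ≤ f + i → i ≤ p →
      (∀ j, i ≤ j → j < p →
        ¬ pvOpenTok <+: cs.drop j ∧ ¬ pvCloseTok <+: cs.drop j) →
      loopA cs start f i depth = loopA cs start cs.length p depth := by
  intro f
  induction f with
  | zero =>
      intro i depth hf hip _
      have hi : i = p := by omega
      rw [hi]
      exact loopA_fuel cs start 0 cs.length p depth (by omega) (by omega)
  | succ f ih =>
      intro i depth hf hip hno
      by_cases hip' : i = p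
      · rw [hip']
        exact loopA_fuel cs start (f + 1) cs.length p depth (by omega) (by omega)
      · have hilt : i < p := by omega
        have hlen : i < cs.length := by omega
        have hni := hno i le_rfl hilt
        rw [loopA, if_pos hlen,
          if_neg (fun h => hni.1 ((matchO_iff cs i).mp h)),
          if_neg (fun h => hni.2 ((matchC_iff cs i).mp h))]
        exact ih (i + 1) depth (by omega) (by omega)
          (fun j h1 h2 => hno j (by omega) h2)

-- A's loop on a tail with no token at all returns (start, -1)
theorem loopA_none (cs : List Char) (start : Int) :
    ∀ (f i : Nat) (depth : Int),
      ¬ pvOpenTok <:+: cs.drop i → ¬ pvCloseTok <:+: cs.drop i →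
      loopA cs start f i depth = (start, -1) := by
  intro f
  induction f with
  | zero => intro i depth _ _; rfl
  | succ f ih =>
      intro i depth hno hnc
      by_cases hlen : i < cs.length
      · rw [loopA, if_pos hlen,
          if_neg (fun h => (no_prefix_of_no_infix cs _ i i le_rfl hno)
            ((matchO_iff cs i).mp h)),
          if_neg (fun h => (no_prefix_of_no_infix cs _ i i le_rfl hnc)
            ((matchC_iff cs i).mp h))]
        exact ih (i + 1) depth
          (fun h => hno (infix_drop_mono cs _ i (i + 1) (by omega) h))
          (fun h => hnc (infix_drop_mono cs _ i (i + 1) (by omega) h))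
      · rw [loopA, if_neg hlen]

theorem main_loop_eq (cs : List Char) (start : Int) :
    ∀ (f i : Nat) (depth : Int), cs.length + 1 ≤ f + i →
      loopA cs start cs.length i depth = foldB start (tokensB cs f i) depth := by
  intro f
  induction f with
  | zero =>
      intro i depth hf
      rw [tokensB]
      exact loopA_ge cs start i depth (by omega) cs.length
  | succ f ih =>
      intro i depth hf
      by_cases hi : i ≤ cs.length
      · rw [tokensB, if_pos hi]
        simp only []
        by_cases h1 : PySem.Chars.findFrom cs pvOpenTok (i : Int) = -1 ∧
            PySem.Chars.findFrom cs pvCloseTok (i : Int) = -1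
        · rw [if_pos h1]
          exact loopA_none cs start cs.length i depth
            ((PySem.Chars.findFrom_natCast_eq_neg_one_iff cs pvOpenTok i hi).mp h1.1)
            ((PySem.Chars.findFrom_natCast_eq_neg_one_iff cs pvCloseTok i hi).mp h1.2)
        · rw [if_neg h1]
          by_cases h2 : PySem.Chars.findFrom cs pvCloseTok (i : Int) = -1 ∨
              (PySem.Chars.findFrom cs pvOpenTok (i : Int) ≠ -1 ∧
                PySem.Chars.findFrom cs pvOpenTok (i : Int) < PySem.Chars.findFrom cs pvCloseTok (i : Int))
          · -- next token is an opening '<div' at position o.toNat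
            rw [if_pos h2]
            have ho : PySem.Chars.findFrom cs pvOpenTok (i : Int) ≠ -1 := by tauto
            obtain ⟨hio, hpre⟩ := pvFindFrom_ge cs pvOpenTok i hi ho
            have hspec := PySem.Chars.findFrom_natCast_spec cs pvOpenTok i hi ho
            have hp4 : (PySem.Chars.findFrom cs pvOpenTok (i : Int)).toNat + 4 ≤ cs.length := by
              have ha := hpre.length_le
              have hb : pvOpenTok.length = 4 := rfl
              rw [hb, List.length_drop] at ha
              omega
            rw [loopA_skip cs start (PySem.Chars.findFrom cs pvOpenTok (i : Int)).toNat
              (by omega) cs.length i depth (by omega) hio ?_]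
            · rw [loopA_fuel cs start cs.length (cs.length + 1)
                (PySem.Chars.findFrom cs pvOpenTok (i : Int)).toNat depth (by omega) (by omega),
                loopA, if_pos (by omega), if_pos ((matchO_iff cs _).mpr hpre)]
              rw [show foldB start ((1, (PySem.Chars.findFrom cs pvOpenTok (i : Int)).toNat + 4)
                    :: tokensB cs f ((PySem.Chars.findFrom cs pvOpenTok (i : Int)).toNat + 4)) depth
                  = foldB start (tokensB cs f ((PySem.Chars.findFrom cs pvOpenTok (i : Int)).toNat + 4))
                      (depth + 1) from by
                rw [foldB, if_neg (by omega)]]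
              exact ih ((PySem.Chars.findFrom cs pvOpenTok (i : Int)).toNat + 4) (depth + 1) (by omega)
            · intro j hj1 hj2
              refine ⟨fun h => hspec.2.2 j hj1 hj2 h, ?_⟩
              rcases h2 with hc1 | hc2
              · exact no_prefix_of_no_infix cs _ i j hj1
                  ((PySem.Chars.findFrom_natCast_eq_neg_one_iff cs pvCloseTok i hi).mp hc1)
              · have hcspec := PySem.Chars.findFrom_natCast_spec cs pvCloseTok i hi
                  (by intro hneg
                      have ha := hspec.1
                      have hb := hc2.2
                      rw [hneg] at hb
                      omega)
                exact hcspec.2.2 j hj1 (by omega)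
          · -- next token is a closing '</div>' at position c.toNat
            rw [if_neg h2]
            have hc : PySem.Chars.findFrom cs pvCloseTok (i : Int) ≠ -1 := by tauto
            obtain ⟨hic, hpre⟩ := pvFindFrom_ge cs pvCloseTok i hi hc
            have hcspec := PySem.Chars.findFrom_natCast_spec cs pvCloseTok i hi hc
            have hp6 : (PySem.Chars.findFrom cs pvCloseTok (i : Int)).toNat + 6 ≤ cs.length := by
              have ha := hpre.length_le
              have hb : pvCloseTok.length = 6 := rfl
              rw [hb, List.length_drop] at ha
              omega
            have hm6 : (cs.drop (PySem.Chars.findFrom cs pvCloseTok (i : Int)).toNat).take 6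
                = pvCloseTok := (matchC_iff cs _).mpr hpre
            rw [loopA_skip cs start (PySem.Chars.findFrom cs pvCloseTok (i : Int)).toNat
              (by omega) cs.length i depth (by omega) hic ?_]
            · rw [loopA_fuel cs start cs.length (cs.length + 1)
                (PySem.Chars.findFrom cs pvCloseTok (i : Int)).toNat depth (by omega) (by omega),
                loopA, if_pos (by omega), if_neg (not_matchO_of_matchC cs _ hm6), if_pos hm6]
              rw [show foldB start ((-1, (PySem.Chars.findFrom cs pvCloseTok (i : Int)).toNat + 6)
                    :: tokensB cs f ((PySem.Chars.findFrom cs pvCloseTok (i : Int)).toNat + 6)) depth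
                  = if depth - 1 = 0
                    then (start, (((PySem.Chars.findFrom cs pvCloseTok (i : Int)).toNat + 6 : Nat) : Int))
                    else foldB start (tokensB cs f ((PySem.Chars.findFrom cs pvCloseTok (i : Int)).toNat + 6))
                      (depth - 1) from by
                rw [foldB, show depth + -1 = depth - 1 from by omega]
                by_cases hd : depth - 1 = 0
                · rw [if_pos ⟨rfl, hd⟩, if_pos hd]
                · rw [if_neg (fun hx => hd hx.2), if_neg hd]]
              by_cases hd : depth - 1 = 0
              · rw [if_pos hd, if_pos hd]
              · rw [if_neg hd, if_neg hd]
                exact ih ((PySem.Chars.findFrom cs pvCloseTok (i : Int)).toNat + 6) (depth - 1) (by omega)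
            · intro j hj1 hj2
              refine ⟨?_, fun h => hcspec.2.2 j hj1 hj2 h⟩
              by_cases ho : PySem.Chars.findFrom cs pvOpenTok (i : Int) = -1
              · exact no_prefix_of_no_infix cs _ i j hj1
                  ((PySem.Chars.findFrom_natCast_eq_neg_one_iff cs pvOpenTok i hi).mp ho)
              · have hospec := PySem.Chars.findFrom_natCast_spec cs pvOpenTok i hi ho
                have hco : PySem.Chars.findFrom cs pvCloseTok (i : Int)
                    ≤ PySem.Chars.findFrom cs pvOpenTok (i : Int) := by
                  by_contra hlt
                  exact h2 (Or.inr ⟨ho, by omega⟩)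
                exact hospec.2.2 j hj1 (by omega)
      · rw [tokensB, if_neg hi]
        exact loopA_ge cs start i depth (by omega) cs.length

-- ===== VERDICT (by name: the statement is the Claim_ definition above) =====
theorem find_mega_nav_bounds_spec : Claim_equal_find_mega_nav_bounds := by
  intro content _
  unfold Spec_find_mega_nav_bounds find_mega_nav_bounds find_mega_nav_bounds_alt
  simp only []
  split
  · rfl
  · split
    · rfl
    · exact main_loop_eq content.toList _ (content.toList.length + 1) _ 0 (by omega)
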